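-- pv_equiv track=rewrite | github.com/allyotov/find-your-okved | src/services/okved.py | _get_digits_of_code_if_correct
-- ===== SOURCE A (Python) =====
-- def _get_digits_of_code_if_correct(okved_code: str) -> str:
--     digits = []
--     for char in okved_code:
--         if char.isalpha():
--             return ''
--         if char.isdigit():
--             digits.append(char)
--     return ''.join(digits)
-- ===== SOURCE B (Python) =====
-- def _get_digits_of_code_if_correct(okved_code: str) -> str:
--     if any(c.isalpha() for c in okved_code):
--         return ''
--     return ''.join(c for c in okved_code if c.isdigit())
-- ===== Notes on version B (the rewrite author's own statement) =====
-- stated objective: simpler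
-- what changed: Replaces the fused early-returning accumulate loop by two independent passes: an existence check for any alphabetic character, then a digit filter.
import Mathlib
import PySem

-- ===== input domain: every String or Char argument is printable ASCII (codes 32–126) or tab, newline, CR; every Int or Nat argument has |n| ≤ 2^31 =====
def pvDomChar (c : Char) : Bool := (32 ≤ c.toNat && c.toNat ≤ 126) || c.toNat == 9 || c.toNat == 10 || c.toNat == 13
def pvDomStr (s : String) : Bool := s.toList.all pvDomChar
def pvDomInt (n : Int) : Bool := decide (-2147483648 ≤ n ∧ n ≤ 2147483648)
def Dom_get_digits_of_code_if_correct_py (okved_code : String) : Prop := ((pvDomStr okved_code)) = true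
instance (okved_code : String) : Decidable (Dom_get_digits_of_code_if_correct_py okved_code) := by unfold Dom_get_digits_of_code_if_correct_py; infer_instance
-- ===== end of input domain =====

-- B replaces A's fused early-return loop by two independent passes (alpha check, then digit filter); same values everywhere.
-- ===== PORT A =====
def pvLoopA : List Char → List Char → String
  | [], digits => String.ofList digits
  | c :: rest, digits =>
      if PySem.Chars.isalpha c then ""
      else if PySem.Chars.isdigit c then pvLoopA rest (digits ++ [c])
      else pvLoopA rest digits

def get_digits_of_code_if_correct_py (okved_code : String) : String :=
  pvLoopA okved_code.toList []

-- ===== PORT B =====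
def get_digits_of_code_if_correct_py_alt (okved_code : String) : String :=
  if okved_code.toList.any PySem.Chars.isalpha then ""
  else String.ofList (okved_code.toList.filter PySem.Chars.isdigit)

-- ===== PRECONDITION & SPEC =====
def Spec_get_digits_of_code_if_correct_py (okved_code : String) (out : String) : Prop := out = get_digits_of_code_if_correct_py_alt okved_code
instance (okved_code : String) (out : String) : Decidable (Spec_get_digits_of_code_if_correct_py okved_code out) := by unfold Spec_get_digits_of_code_if_correct_py; infer_instance

-- ===== CLAIM (what is proved, stated in full; the proofs are below) =====
def Claim_equal_get_digits_of_code_if_correct_py : Prop := ∀ (okved_code : String), Dom_get_digits_of_code_if_correct_py okved_code → Spec_get_digits_of_code_if_correct_py okved_code (get_digits_of_code_if_correct_py okved_code)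

-- ===== LEMMAS AND PROOFS =====

-- ===== VERDICT (by name: the statement is the Claim_ definition above) =====
theorem pvLoopA_eq (l : List Char) : ∀ acc, pvLoopA l acc =
    if l.any PySem.Chars.isalpha then "" else String.ofList (acc ++ l.filter PySem.Chars.isdigit) := by
  induction l with
  | nil => intro acc; simp [pvLoopA]
  | cons c rest ih =>
      intro acc
      simp only [pvLoopA, List.any_cons, List.filter_cons]
      by_cases ha : PySem.Chars.isalpha c
      · simp [ha]
      · by_cases hd : PySem.Chars.isdigit c
        · simp [ha, hd, ih]
        · simp [ha, hd, ih]

theorem get_digits_of_code_if_correct_py_spec : Claim_equal_get_digits_of_code_if_correct_py := by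
  intro s _
  unfold Spec_get_digits_of_code_if_correct_py get_digits_of_code_if_correct_py get_digits_of_code_if_correct_py_alt
  rw [pvLoopA_eq]
  simp
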